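-- pv_equiv track=rewrite | github.com/pypi-data/pypi-mirror-295 | packages/smak/smak-3.0.10.tar.gz/smak-3.0.10/src/smak/LAMSImageGet.py | arrayedit
-- ===== SOURCE A (Python) =====
-- def arrayedit(a):
--     a=a[1:-1]
--     final = []
--     c=1
--     for i in range(len(a)):
--         if i<len(a)-1:
--             if a[i+1]==a[i]+1:
--                 c+=1
--                 if c>1: final.append(a[i])
--                 continue
--             if c==0:
--                 final.append(a[i])
--             else:
--                 c==0
--                 continue
--     while len(final)>1000:
--         final=final[::2]
--     return final
-- ===== SOURCE B (Python) =====
-- def arrayedit(a):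
--     b = a[1:-1]
--     n = len(b)
--     final = []
--     i = 0
--     while i < n:
--         # find the end of the maximal consecutive run starting at i
--         j = i
--         while j + 1 < n and b[j + 1] == b[j] + 1:
--             j += 1
--         final += b[i:j]          # keep all but the last element of the run
--         i = j + 1
--     # downsample in one strided slice: smallest k with ceil(len/2^k) <= 1000
--     m = (len(final) + 999) // 1000
--     k = max(m - 1, 0).bit_length()
--     return final[::1 << k]
-- ===== Notes on version B (the rewrite author's own statement) =====
-- stated objective: simpler
-- what changed: B replaces A's per-index counter loop by a two-pointer scan over maximal consecutive runs (appending each run minus its last element as one slice), and replaces A's repeated `final = final[::2]` halving loop by a single strided slice whose power-of-two stride is computed in closed form via bit_length.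
import Mathlib
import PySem

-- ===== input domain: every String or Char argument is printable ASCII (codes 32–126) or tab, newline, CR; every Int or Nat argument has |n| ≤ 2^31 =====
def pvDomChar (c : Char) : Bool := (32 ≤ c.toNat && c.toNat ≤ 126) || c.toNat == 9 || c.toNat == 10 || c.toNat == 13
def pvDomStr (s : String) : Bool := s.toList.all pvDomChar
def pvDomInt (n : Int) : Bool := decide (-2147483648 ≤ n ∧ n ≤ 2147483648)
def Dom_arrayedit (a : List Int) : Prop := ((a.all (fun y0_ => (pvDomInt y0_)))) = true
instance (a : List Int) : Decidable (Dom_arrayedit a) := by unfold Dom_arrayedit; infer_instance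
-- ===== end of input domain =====

-- B scans for maximal consecutive runs with a two-pointer loop (keeping each run minus
-- its last element) instead of A's index loop with a counter, and replaces A's repeated
-- `final = final[::2]` halving loop by one strided slice whose power-of-two stride is
-- computed in closed form from bit_length; objective: simpler.

-- ceilDiv n s = ceil(n / s); strideMap xs s = xs[::s] for a positive step s.
-- These helpers and the next three lemmas are cited by the ports' termination proofs.
def ceilDiv (n s : Nat) : Nat := (n + s - 1) / s

def strideMap (xs : List Int) (s : Nat) : List Int :=
  (List.range (ceilDiv xs.length s)).map (fun k => xs.getD (s * k) 0)

theorem ceilDiv_le_iff {n s q : Nat} (hs : 0 < s) : ceilDiv n s ≤ q ↔ n ≤ q * s := by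
  unfold ceilDiv
  rw [Nat.div_le_iff_le_mul_add_pred hs, Nat.mul_comm]
  omega

theorem mul_lt_of_lt_ceilDiv {c b k : Nat} (hb : 0 < b) (hk : k < ceilDiv c b) :
    b * k < c := by
  by_contra hcon
  have : ceilDiv c b ≤ k := (ceilDiv_le_iff hb).mpr (by rw [Nat.mul_comm]; omega)
  omega

-- xs[::s] for a positive step s, characterised: exactly what Python's slicing computes.
theorem slice?_pos_step (xs : List Int) (s : Nat) (hs : 0 < s) :
    PySem.List.slice? xs none none (s : Int) = some (strideMap xs s) := by
  have hs' : ¬((s : Int) = 0) := by omega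
  have hsneg : ¬((s : Int) < 0) := by omega
  unfold PySem.List.slice? PySem.List.sliceIndices
  rw [if_neg hs']
  simp only [if_neg hsneg, if_pos (show (0:Int) < (s:Int) by omega)]
  have hcnt : (if (0:Int) < (xs.length:Int) then (((xs.length:Int) - 0 + (s:Int) - 1) / (s:Int)).toNat else 0) = ceilDiv xs.length s := by
    by_cases h0 : (0:Int) < (xs.length : Int)
    · rw [if_pos h0]
      have h1 : ((xs.length : Int) - 0 + (s:Int) - 1) = ((xs.length + s - 1 : Nat) : Int) := by
        omega
      rw [h1, ← Int.natCast_div, Int.toNat_natCast]; rfl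
    · rw [if_neg h0]
      have hz : xs.length = 0 := by omega
      simp [ceilDiv, hz]
      exact (Nat.div_eq_of_lt (by omega)).symm
  rw [hcnt]
  congr 1
  unfold strideMap
  have main : ∀ (l : List Nat), (∀ k ∈ l, k < ceilDiv xs.length s) →
      List.filterMap (fun x : Nat => xs[((0:Int) + (s:Int) * (x:Int)).toNat]?) l
        = l.map (fun k => xs.getD (s * k) 0) := by
    intro l
    induction l with
    | nil => intro _; rfl
    | cons h t ih =>
      intro hmem
      have hk : h < ceilDiv xs.length s := hmem h (List.mem_cons_self)
      have hlt : s * h < xs.length := mul_lt_of_lt_ceilDiv hs hk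
      have hidx : (((0:Int) + (s:Int) * (h:Int))).toNat = s * h := by omega
      simp only [List.filterMap_cons, List.map_cons, hidx,
        List.getElem?_eq_getElem hlt]
      rw [ih (fun k hkt => hmem k (List.mem_cons_of_mem _ hkt)),
        List.getD_eq_getElem xs 0 hlt]
  exact main _ (by simp [List.mem_range])

theorem length_strideMap (xs : List Int) (s : Nat) :
    (strideMap xs s).length = ceilDiv xs.length s := by
  simp [strideMap]

-- ===== PORT A =====
-- the body of A's `for i in range(len(a))` loop; state = (final, c)
def arrayeditBody (a2 : List Int) (st : List Int × Int) (i : Int) : List Int × Int :=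
  if i < PySem.List.len a2 - 1 then
    if PySem.List.pyGetD a2 (i + 1) 0 = PySem.List.pyGetD a2 i 0 + 1 then
      -- c += 1; if c > 1: final.append(a[i]); continue
      (if 1 < st.2 + 1 then st.1 ++ [PySem.List.pyGetD a2 i 0] else st.1, st.2 + 1)
    else if st.2 = 0 then (st.1 ++ [PySem.List.pyGetD a2 i 0], st.2)
    else st  -- `c==0` is a no-op comparison; continue
  else st

-- while len(final) > 1000: final = final[::2]
def arrayeditWhile (final : List Int) : List Int :=
  if 1000 < PySem.List.len final then
    arrayeditWhile ((PySem.List.slice? final none none 2).getD [])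
  else final
termination_by final.length
decreasing_by
  rename_i h
  have h2 : PySem.List.slice? final none none ((2 : Nat) : Int) = some (strideMap final 2) :=
    slice?_pos_step final 2 (by omega)
  norm_num at h2
  rw [h2]
  simp only [Option.getD_some, length_strideMap]
  simp [PySem.List.len_eq] at h
  unfold ceilDiv
  omega

def arrayedit (a : List Int) : List Int :=
  let a2 := PySem.List.slice a (some 1) (some (-1))
  let st := (PySem.List.pyRange 0 (PySem.List.len a2) 1).foldl (arrayeditBody a2) ([], 1)
  arrayeditWhile st.1

-- ===== PORT B =====
-- inner `while j + 1 < n and b[j+1] == b[j] + 1: j += 1`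
def runEnd (b : List Int) (n j : Int) : Int :=
  if j + 1 < n ∧ PySem.List.pyGetD b (j + 1) 0 = PySem.List.pyGetD b j 0 + 1 then
    runEnd b n (j + 1)
  else j
termination_by (n - j).toNat
decreasing_by rename_i h; omega

-- cited by runLoop's termination proof
theorem runEnd_ge (b : List Int) (n j : Int) : j ≤ runEnd b n j := by
  unfold runEnd
  split
  · exact le_trans (by omega) (runEnd_ge b n (j + 1))
  · exact le_refl j
termination_by (n - j).toNat
decreasing_by rename_i h; omega

-- outer `while i < n:` loop; each step appends the run minus its last element
def runLoop (b : List Int) (n i : Int) (final : List Int) : List Int :=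
  if i < n then
    let j := runEnd b n i
    runLoop b n (j + 1) (final ++ PySem.List.slice b (some i) (some j))
  else final
termination_by (n - i).toNat
decreasing_by
  rename_i h
  have := runEnd_ge b n i
  omega

def arrayedit_alt (a : List Int) : List Int :=
  let b := PySem.List.slice a (some 1) (some (-1))
  let n := PySem.List.len b
  let final := runLoop b n 0 []
  -- m = (len(final) + 999) // 1000
  let m := PySem.Int.floordiv (PySem.List.len final + 999) 1000
  -- k = max(m - 1, 0).bit_length()
  let k : Nat := PySem.Int.bitLength (max (m - 1) 0)
  -- final[::1 << k]
  (PySem.List.slice? final none none ((2 : Int) ^ k)).getD []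

-- ===== PRECONDITION & SPEC =====
def Spec_arrayedit (a : List Int) (out : List Int) : Prop := out = arrayedit_alt a
instance (a : List Int) (out : List Int) : Decidable (Spec_arrayedit a out) := by
  unfold Spec_arrayedit; infer_instance

-- ===== CLAIM =====
def Claim_equal_arrayedit : Prop := ∀ (a : List Int), Dom_arrayedit a → Spec_arrayedit a (arrayedit a)

-- ===== LEMMAS AND PROOFS =====

theorem strideMap_one (xs : List Int) : strideMap xs 1 = xs := by
  apply List.ext_getElem
  · simp [strideMap, ceilDiv]
  · intro i h1 h2
    simp only [strideMap, List.getElem_map, List.getElem_range, Nat.one_mul]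
    rw [List.getD_eq_getElem?_getD, List.getElem?_eq_getElem h2]
    rfl

theorem le_ceilDiv_mul (n s : Nat) (hs : 0 < s) : n ≤ ceilDiv n s * s :=
  (ceilDiv_le_iff hs).mp le_rfl

theorem ceilDiv_ceilDiv (n a b : Nat) (ha : 0 < a) (hb : 0 < b) :
    ceilDiv (ceilDiv n a) b = ceilDiv n (a * b) := by
  apply Nat.le_antisymm
  · rw [ceilDiv_le_iff hb, ceilDiv_le_iff ha]
    calc n ≤ ceilDiv n (a * b) * (a * b) := le_ceilDiv_mul n (a * b) (by positivity)
    _ = ceilDiv n (a * b) * b * a := by ring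
  · rw [ceilDiv_le_iff (by positivity)]
    calc n ≤ ceilDiv (ceilDiv n a) b * b * a := by
            have h1 := le_ceilDiv_mul n a ha
            have h2 := le_ceilDiv_mul (ceilDiv n a) b hb
            nlinarith
    _ = ceilDiv (ceilDiv n a) b * (a * b) := by ring

theorem getD_strideMap (xs : List Int) (s k : Nat) (hk : k < ceilDiv xs.length s) :
    (strideMap xs s).getD k 0 = xs.getD (s * k) 0 := by
  simp only [strideMap]
  rw [List.getD_eq_getElem?_getD, List.getElem?_map, List.getElem?_range hk]
  rfl

theorem strideMap_comp (xs : List Int) (a b : Nat) (ha : 0 < a) (hb : 0 < b) :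
    strideMap (strideMap xs a) b = strideMap xs (a * b) := by
  have hlen : (strideMap (strideMap xs a) b).length = (strideMap xs (a * b)).length := by
    simp only [length_strideMap, ceilDiv_ceilDiv xs.length a b ha hb]
  apply List.ext_getElem hlen
  intro i h1 h2
  have hi : i < ceilDiv (strideMap xs a).length b := by
    simpa [length_strideMap] using h1
  have hi' : i < ceilDiv xs.length (a * b) := by
    simpa [length_strideMap] using h2
  have e1 : (strideMap (strideMap xs a) b)[i] = (strideMap (strideMap xs a) b).getD i 0 := by
    rw [List.getD_eq_getElem?_getD, List.getElem?_eq_getElem h1]; rfl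
  have e2 : (strideMap xs (a * b))[i] = (strideMap xs (a * b)).getD i 0 := by
    rw [List.getD_eq_getElem?_getD, List.getElem?_eq_getElem h2]; rfl
  rw [e1, e2, getD_strideMap _ _ _ hi, getD_strideMap xs (a * b) i hi']
  have hbi : b * i < ceilDiv xs.length a :=
    mul_lt_of_lt_ceilDiv hb (by simpa [length_strideMap] using hi)
  rw [getD_strideMap xs a (b * i) hbi]
  ring_nf

-- ===== the while loop equals one power-of-two stride =====
theorem while_eq_pow (xs : List Int) (K : Nat)
    (hK : ceilDiv xs.length (2 ^ K) ≤ 1000)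
    (hmin : ∀ j, j < K → 1000 < ceilDiv xs.length (2 ^ j)) :
    ∀ j, j ≤ K → arrayeditWhile (strideMap xs (2 ^ j)) = strideMap xs (2 ^ K) := by
  intro j hj
  induction hd : K - j generalizing j with
  | zero =>
    have hjK : j = K := by omega
    subst hjK
    rw [arrayeditWhile, if_neg]
    simp only [PySem.List.len_eq, length_strideMap, not_lt]
    exact_mod_cast hK
  | succ d ih =>
    have hjK : j < K := by omega
    rw [arrayeditWhile, if_pos]
    · have h2 : PySem.List.slice? (strideMap xs (2 ^ j)) none none ((2 : Nat) : Int)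
          = some (strideMap (strideMap xs (2 ^ j)) 2) := slice?_pos_step _ 2 (by omega)
      norm_num at h2
      rw [h2, Option.getD_some, strideMap_comp xs (2 ^ j) 2 (by positivity) (by omega),
        show 2 ^ j * 2 = 2 ^ (j + 1) by ring]
      exact ih (j + 1) (by omega) (by omega)
    · simp only [PySem.List.len_eq, length_strideMap]
      exact_mod_cast hmin j hjK

-- ===== front part: both loops build the `keep` list =====
-- the canonical filtered list: b[k] for k with b[k+1] == b[k] + 1
def keepC (b : List Int) (k : Nat) : Bool := decide (b.getD (k + 1) 0 = b.getD k 0 + 1)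

def keep (b : List Int) : List Int :=
  ((List.range (b.length - 1)).filter (keepC b)).map (fun k => b.getD k 0)

def keepFrom (b : List Int) (i : Nat) : List Int :=
  ((List.range (b.length - 1)).filter (fun k => decide (i ≤ k) && keepC b k)).map
    (fun k => b.getD k 0)

-- A-side: drop the dead counter
def simpleBody (a2 : List Int) (acc : List Int) (i : Int) : List Int :=
  if i < PySem.List.len a2 - 1 ∧ PySem.List.pyGetD a2 (i + 1) 0 = PySem.List.pyGetD a2 i 0 + 1
  then acc ++ [PySem.List.pyGetD a2 i 0] else acc

-- the counter c never matters once c ≥ 1: it only grows, `c > 1` after `c += 1` is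
-- always true and `c == 0` always false
theorem step_fst (a2 : List Int) (acc : List Int) (c i : Int) (hc : 1 ≤ c) :
    (arrayeditBody a2 (acc, c) i).1 = simpleBody a2 acc i := by
  unfold arrayeditBody simpleBody
  by_cases h1 : i < PySem.List.len a2 - 1
  · by_cases h2 : PySem.List.pyGetD a2 (i + 1) 0 = PySem.List.pyGetD a2 i 0 + 1
    · rw [if_pos h1, if_pos h2, if_pos (show (1 : Int) < (acc, c).2 + 1 by omega),
        if_pos ⟨h1, h2⟩]
    · rw [if_pos h1, if_neg h2, if_neg (show ¬((acc, c).2 = 0) by omega),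
        if_neg (by tauto)]
  · rw [if_neg h1, if_neg (by tauto)]

theorem step_snd (a2 : List Int) (acc : List Int) (c i : Int) (hc : 1 ≤ c) :
    1 ≤ (arrayeditBody a2 (acc, c) i).2 := by
  unfold arrayeditBody
  split_ifs <;> simp <;> omega

theorem fold_drop_counter (a2 : List Int) (l : List Int) :
    ∀ (acc : List Int) (c : Int), 1 ≤ c →
      (l.foldl (arrayeditBody a2) (acc, c)).1 = l.foldl (simpleBody a2) acc := by
  induction l with
  | nil => intro acc c hc; rfl
  | cons i t ih =>
    intro acc c hc
    simp only [List.foldl_cons]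
    have hsplit : arrayeditBody a2 (acc, c) i
        = ((arrayeditBody a2 (acc, c) i).1, (arrayeditBody a2 (acc, c) i).2) := rfl
    rw [hsplit, ih _ _ (step_snd a2 acc c i hc), step_fst a2 acc c i hc]

theorem front_eq (b : List Int) :
    (PySem.List.pyRange 0 (PySem.List.len b) 1).foldl (simpleBody b) [] = keep b := by
  rw [PySem.List.len_eq, PySem.List.pyRange_one]
  simp only [Int.sub_zero, Int.toNat_natCast]
  rw [List.foldl_map]
  have hfun : (fun (acc : List Int) (k : Nat) => simpleBody b acc (0 + (k:Int)))
      = (fun acc k => if (fun k => decide (k + 1 < b.length) && keepC b k) k = true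
          then acc ++ [(fun k => b.getD k 0) k] else acc) := by
    funext acc k
    simp only [simpleBody, PySem.List.len_eq, zero_add, keepC]
    rw [show ((k:Int) + 1) = (((k + 1 : Nat)) : Int) by push_cast; ring]
    simp only [PySem.List.pyGetD_natCast]
    by_cases h1 : k + 1 < b.length <;>
      by_cases h2 : b.getD (k + 1) 0 = b.getD k 0 + 1
    · rw [if_pos ⟨by omega, h2⟩, decide_eq_true h1, decide_eq_true h2]; simp
    · rw [if_neg (by rintro ⟨_, hc2⟩; exact h2 hc2), decide_eq_false h2]; simp
    · rw [if_neg (by rintro ⟨hc1, _⟩; exact h1 (by omega)), decide_eq_false h1]; simp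
    · rw [if_neg (by rintro ⟨_, hc2⟩; exact h2 hc2), decide_eq_false h2]; simp
  rw [hfun, PySem.List.foldl_append_if, List.nil_append]
  unfold keep
  rcases Nat.eq_zero_or_pos b.length with hn | hn
  · simp [hn]
  · rw [show b.length = (b.length - 1) + 1 by omega, List.range_succ, List.filter_append]
    have hlast : List.filter (fun k => decide (k + 1 < (b.length - 1) + 1) && keepC b k)
        [b.length - 1] = [] := by
      simp only [List.filter_cons, List.filter_nil]
      rw [if_neg]
      simp
    rw [hlast, List.append_nil, show (b.length - 1) + 1 - 1 = b.length - 1 by omega]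
    congr 1
    apply List.filter_congr
    intro k hk
    rw [List.mem_range] at hk
    simp [show k + 1 < (b.length - 1) + 1 by omega]

-- ===== B-side: the run loop builds the same list =====
theorem runEnd_step (b : List Int) (n j : Int)
    (h : j + 1 < n ∧ PySem.List.pyGetD b (j + 1) 0 = PySem.List.pyGetD b j 0 + 1) :
    runEnd b n j = runEnd b n (j + 1) := by
  rw [runEnd, if_pos h]

theorem runEnd_base (b : List Int) (n j : Int)
    (h : ¬(j + 1 < n ∧ PySem.List.pyGetD b (j + 1) 0 = PySem.List.pyGetD b j 0 + 1)) :
    runEnd b n j = j := by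
  rw [runEnd, if_neg h]

theorem runEnd_lt (b : List Int) (n j : Int) (hj : j < n) : runEnd b n j < n := by
  induction j using runEnd.induct (b := b) (n := n) with
  | case1 j h ih => rw [runEnd_step b n j h]; exact ih h.1
  | case2 j h => rw [runEnd_base b n j h]; exact hj

theorem runEnd_cond (b : List Int) (n j : Int) :
    ∀ k, j ≤ k → k < runEnd b n j →
      PySem.List.pyGetD b (k + 1) 0 = PySem.List.pyGetD b k 0 + 1 := by
  induction j using runEnd.induct (b := b) (n := n) with
  | case1 j h ih =>
    intro k hk1 hk2
    rw [runEnd_step b n j h] at hk2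
    rcases eq_or_lt_of_le hk1 with heq | hlt
    · rw [← heq]; exact h.2
    · exact ih k (by omega) hk2
  | case2 j h =>
    intro k hk1 hk2
    rw [runEnd_base b n j h] at hk2
    omega

theorem runEnd_stop (b : List Int) (n j : Int) :
    ¬(runEnd b n j + 1 < n ∧
      PySem.List.pyGetD b (runEnd b n j + 1) 0 = PySem.List.pyGetD b (runEnd b n j) 0 + 1) := by
  induction j using runEnd.induct (b := b) (n := n) with
  | case1 j h ih => rw [runEnd_step b n j h]; exact ih
  | case2 j h => rw [runEnd_base b n j h]; exact h

theorem slice_eq_map_range' (b : List Int) (i j : Nat) (hij : i ≤ j) (hj : j ≤ b.length) :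
    (b.drop i).take (j - i) = (List.range' i (j - i)).map (fun k => b.getD k 0) := by
  apply List.ext_getElem
  · simp only [List.length_take, List.length_drop, List.length_map, List.length_range']
    omega
  · intro p h1 h2
    simp only [List.length_take, List.length_drop] at h1
    have hp : i + p < b.length := by omega
    simp only [List.getElem_take, List.getElem_drop, List.getElem_map, List.getElem_range']
    rw [List.getD_eq_getElem b 0 (by omega : i + 1 * p < b.length)]
    congr 1
    omega

theorem keepFrom_split (b : List Int) (i j : Nat) (hij : i ≤ j) (hj : j < b.length)
    (hrun : ∀ k, i ≤ k → k < j → keepC b k = true)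
    (hstop : j < b.length - 1 → keepC b j = false) :
    keepFrom b i = (List.range' i (j - i)).map (fun k => b.getD k 0) ++ keepFrom b (j + 1) := by
  unfold keepFrom
  have hjm : j ≤ b.length - 1 := by omega
  have hsplit : List.range (b.length - 1)
      = List.range' 0 i ++ List.range' i (j - i) ++ List.range' j (b.length - 1 - j) := by
    have e2 : List.range' i (j - i) ++ List.range' j (b.length - 1 - j)
        = List.range' i (b.length - 1 - i) := by
      have h := List.range'_append_1 (s := i) (m := j - i) (n := b.length - 1 - j)
      rw [show i + (j - i) = j by omega] at h
      rw [h]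
      congr 1
      omega
    have e1 : List.range' 0 i ++ List.range' i (b.length - 1 - i)
        = List.range' 0 (b.length - 1) := by
      have h := List.range'_append_1 (s := 0) (m := i) (n := b.length - 1 - i)
      rw [show 0 + i = i by omega] at h
      rw [h]
      congr 1
      omega
    rw [List.range_eq_range', List.append_assoc, e2, e1]
  rw [hsplit]
  simp only [List.filter_append, List.map_append]
  have h1i : (List.range' 0 i).filter (fun k => decide (i ≤ k) && keepC b k) = [] := by
    rw [List.filter_eq_nil_iff]
    intro k hk
    have := (List.mem_range'_1).mp hk
    simp only [Bool.and_eq_true, decide_eq_true_eq, not_and]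
    intro h
    omega
  have h1j : (List.range' 0 i).filter (fun k => decide (j + 1 ≤ k) && keepC b k) = [] := by
    rw [List.filter_eq_nil_iff]
    intro k hk
    have := (List.mem_range'_1).mp hk
    simp only [Bool.and_eq_true, decide_eq_true_eq, not_and]
    intro h
    omega
  have h2i : (List.range' i (j - i)).filter (fun k => decide (i ≤ k) && keepC b k)
      = List.range' i (j - i) := by
    rw [List.filter_eq_self]
    intro k hk
    have hm := (List.mem_range'_1).mp hk
    simp only [Bool.and_eq_true, decide_eq_true_eq]
    exact ⟨by omega, hrun k (by omega) (by omega)⟩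
  have h2j : (List.range' i (j - i)).filter (fun k => decide (j + 1 ≤ k) && keepC b k) = [] := by
    rw [List.filter_eq_nil_iff]
    intro k hk
    have := (List.mem_range'_1).mp hk
    simp only [Bool.and_eq_true, decide_eq_true_eq, not_and]
    intro h
    omega
  have h3 : (List.range' j (b.length - 1 - j)).filter (fun k => decide (i ≤ k) && keepC b k)
      = (List.range' j (b.length - 1 - j)).filter (fun k => decide (j + 1 ≤ k) && keepC b k) := by
    apply List.filter_congr
    intro k hk
    have hm := (List.mem_range'_1).mp hk
    rcases eq_or_lt_of_le hm.1 with heq | hlt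
    · have hkc : keepC b j = false := hstop (by omega)
      rw [← heq]
      simp [hkc]
    · simp [show i ≤ k by omega, show j + 1 ≤ k by omega]
  rw [h1i, h1j, h2i, h2j, h3]
  simp

theorem keepFrom_nil (b : List Int) (i : Nat) (hi : b.length ≤ i) : keepFrom b i = [] := by
  unfold keepFrom
  rw [show ((List.range (b.length - 1)).filter (fun k => decide (i ≤ k) && keepC b k)) = [] from ?_,
    List.map_nil]
  rw [List.filter_eq_nil_iff]
  intro k hk
  rw [List.mem_range] at hk
  simp only [Bool.and_eq_true, decide_eq_true_eq, not_and]
  intro h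
  omega

theorem runLoop_step (b : List Int) (n i : Int) (final : List Int) (h : i < n) :
    runLoop b n i final
      = runLoop b n (runEnd b n i + 1)
          (final ++ PySem.List.slice b (some i) (some (runEnd b n i))) := by
  rw [runLoop, if_pos h]

theorem runLoop_eq (b : List Int) (n i : Int) (acc : List Int) :
    n = (b.length : Int) → 0 ≤ i → runLoop b n i acc = acc ++ keepFrom b i.toNat := by
  induction i, acc using runLoop.induct (b := b) (n := n) with
  | case1 i acc hlt j ih =>
    intro hn hi
    have hj : j = runEnd b n i := rfl
    have hge : i ≤ j := hj ▸ runEnd_ge b n i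
    have hltn : j < n := hj ▸ runEnd_lt b n i hlt
    have hj0 : 0 ≤ j := by omega
    rw [runLoop_step b n i acc hlt, ← hj, ih hn (by omega)]
    have hslice : PySem.List.slice b (some i) (some j)
        = (List.range' i.toNat (j.toNat - i.toNat)).map (fun k => b.getD k 0) := by
      rw [PySem.List.slice_toNat b hi hj0]
      exact slice_eq_map_range' b i.toNat j.toNat (by omega) (by omega)
    have hkeep : keepFrom b i.toNat
        = (List.range' i.toNat (j.toNat - i.toNat)).map (fun k => b.getD k 0)
          ++ keepFrom b (j.toNat + 1) := by
      apply keepFrom_split b i.toNat j.toNat (by omega) (by omega)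
      · intro k hk1 hk2
        have hc := runEnd_cond b n i (k : Int) (by omega) (by rw [← hj]; omega)
        rw [show ((k : Int) + 1) = ((k + 1 : Nat) : Int) by push_cast; ring] at hc
        simp only [PySem.List.pyGetD_natCast] at hc
        simp only [keepC, decide_eq_true_eq]
        exact hc
      · intro hklt
        have hs := runEnd_stop b n i
        rw [← hj] at hs
        have hcond : j + 1 < n := by omega
        have : ¬(PySem.List.pyGetD b (j + 1) 0 = PySem.List.pyGetD b j 0 + 1) := by
          intro hc; exact hs ⟨hcond, hc⟩
        rw [show j = ((j.toNat : Nat) : Int) by omega,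
          show ((j.toNat : Nat) : Int) + 1 = ((j.toNat + 1 : Nat) : Int) by push_cast; ring]
          at this
        simp only [PySem.List.pyGetD_natCast] at this
        simp only [keepC, decide_eq_false_iff_not]
        exact this
    rw [hkeep, hslice, show (j + 1).toNat = j.toNat + 1 by omega, List.append_assoc]
  | case2 i acc hlt =>
    intro hn hi
    rw [runLoop, if_neg hlt, keepFrom_nil b i.toNat (by omega), List.append_nil]

theorem keepFrom_zero (b : List Int) : keepFrom b 0 = keep b := by
  unfold keepFrom keep
  congr 1

-- the closed-form bit_length stride is the smallest adequate power of two
theorem bitLength_stride_props (nf : Nat) :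
    (ceilDiv nf (2 ^ PySem.Int.bitLength ((ceilDiv nf 1000 - 1 : Nat) : Int)) ≤ 1000) ∧
    (∀ j, j < PySem.Int.bitLength ((ceilDiv nf 1000 - 1 : Nat) : Int) →
      1000 < ceilDiv nf (2 ^ j)) := by
  set m := ceilDiv nf 1000 with hm
  set L := PySem.Int.bitLength ((m - 1 : Nat) : Int) with hL
  constructor
  · have h1 : ((m - 1 : Nat) : Int).natAbs < 2 ^ L := PySem.Int.lt_two_pow_bitLength _
    rw [Int.natAbs_natCast] at h1
    have hp : 0 < 2 ^ L := by positivity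
    have h2 : nf ≤ m * 1000 := le_ceilDiv_mul nf 1000 (by omega)
    rw [ceilDiv_le_iff (by positivity)]
    have hmle : m ≤ 2 ^ L := by omega
    calc nf ≤ m * 1000 := h2
    _ ≤ 2 ^ L * 1000 := Nat.mul_le_mul_right 1000 hmle
    _ = 1000 * 2 ^ L := by ring
  · intro j hj
    have hne : ((m - 1 : Nat) : Int) ≠ 0 := by
      intro h0
      rw [h0] at hL
      simp [PySem.Int.bitLength_zero] at hL
      omega
    have h1 : 2 ^ (L - 1) ≤ ((m - 1 : Nat) : Int).natAbs :=
      PySem.Int.two_pow_bitLength_le _ hne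
    rw [Int.natAbs_natCast] at h1
    have h2j : 2 ^ j ≤ m - 1 := by
      calc 2 ^ j ≤ 2 ^ (L - 1) := Nat.pow_le_pow_right (by omega) (by omega)
      _ ≤ m - 1 := h1
    have hm1 : ¬(m ≤ 2 ^ j) := by
      have : 0 < 2 ^ j := by positivity
      omega
    rw [hm] at hm1
    rw [ceilDiv_le_iff (by omega : (0:Nat) < 1000)] at hm1
    by_contra hcon
    rw [not_lt, ceilDiv_le_iff (by positivity)] at hcon
    omega

-- ===== VERDICT =====
theorem arrayedit_spec : Claim_equal_arrayedit := by
  intro a _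
  unfold Spec_arrayedit arrayedit arrayedit_alt
  simp only []
  set b := PySem.List.slice a (some 1) (some (-1)) with hb
  -- both front loops produce `keep b`
  have hA : ((PySem.List.pyRange 0 (PySem.List.len b) 1).foldl (arrayeditBody b) ([], 1)).1
      = keep b := by
    rw [fold_drop_counter b _ [] 1 le_rfl, front_eq]
  have hB : runLoop b (PySem.List.len b) 0 [] = keep b := by
    rw [runLoop_eq b (PySem.List.len b) 0 [] (by simp [PySem.List.len_eq]) le_rfl,
      List.nil_append, Int.toNat_zero, keepFrom_zero]
  rw [hA, hB]
  set F := keep b with hF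
  -- the integer m equals the natural ceiling division
  set nf := F.length with hnf
  have hm : PySem.Int.floordiv (PySem.List.len F + 999) 1000 = ((ceilDiv nf 1000 : Nat) : Int) := by
    rw [PySem.List.len_eq, ← hnf,
      show ((nf : Int) + 999) = ((nf + 999 : Nat) : Int) by push_cast; ring,
      show ((1000 : Int)) = ((1000 : Nat) : Int) by norm_num,
      PySem.Int.floordiv_natCast]
    rfl
  rw [hm]
  have hmax : max (((ceilDiv nf 1000 : Nat) : Int) - 1) 0 = ((ceilDiv nf 1000 - 1 : Nat) : Int) := by
    omega
  rw [hmax]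
  set K := PySem.Int.bitLength ((ceilDiv nf 1000 - 1 : Nat) : Int) with hK
  have hprops := bitLength_stride_props nf
  rw [← hK] at hprops
  have hchar : PySem.List.slice? F none none ((2 : Int) ^ K) = some (strideMap F (2 ^ K)) := by
    have := slice?_pos_step F (2 ^ K) (by positivity)
    rwa [show (((2 ^ K : Nat) : Int)) = (2 : Int) ^ K by push_cast; ring] at this
  rw [hchar, Option.getD_some]
  have := while_eq_pow F K hprops.1 hprops.2 0 (by omega)
  rwa [pow_zero, strideMap_one] at this
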